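-- pv_equiv track=rewrite | github.com/Trina-SE/Text_to_Python | src/text2python/metrics.py | _strip_special
-- ===== SOURCE A (Python) =====
-- def _strip_special(seq, pad_idx, eos_idx):
--     cleaned = []
--     for t in seq:
--         if t == pad_idx:
--             continue
--         if t == eos_idx:
--             break
--         cleaned.append(t)
--     return cleaned
-- ===== SOURCE B (Python) =====
-- def _strip_special(seq, pad_idx, eos_idx):
--     toks = [t for t in seq if t != pad_idx]
--     end = toks.index(eos_idx) if eos_idx in toks else len(toks)
--     return toks[:end]
-- ===== Notes on version B (the rewrite author's own statement) =====
-- stated objective: alternative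
-- what changed: Replaces A's single fused loop with break/continue by a two-phase decomposition: drop pad tokens with a comprehension, then truncate the filtered list at the first eos found by index/slice.
import Mathlib
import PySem

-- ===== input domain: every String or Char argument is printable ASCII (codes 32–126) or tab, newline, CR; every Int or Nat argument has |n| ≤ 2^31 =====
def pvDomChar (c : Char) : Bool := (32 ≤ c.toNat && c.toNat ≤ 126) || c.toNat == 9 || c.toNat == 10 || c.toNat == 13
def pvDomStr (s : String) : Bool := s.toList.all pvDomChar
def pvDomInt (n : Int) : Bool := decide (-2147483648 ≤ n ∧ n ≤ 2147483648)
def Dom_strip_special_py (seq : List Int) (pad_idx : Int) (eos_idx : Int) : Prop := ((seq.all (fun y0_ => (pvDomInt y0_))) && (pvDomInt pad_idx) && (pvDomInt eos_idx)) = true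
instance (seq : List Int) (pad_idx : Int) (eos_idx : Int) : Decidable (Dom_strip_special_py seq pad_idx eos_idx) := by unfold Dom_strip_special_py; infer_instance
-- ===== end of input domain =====

-- B replaces A's fused loop (continue on pad, break on eos) by a two-phase
-- decomposition: filter out pad tokens, then truncate at the first eos.

-- ===== PORT A =====
-- the for-loop with continue/break, as structural recursion (break = stop recursing)
def strip_special_py (seq : List Int) (pad_idx : Int) (eos_idx : Int) : List Int :=
  match seq with
  | [] => []
  | t :: rest =>
    if t = pad_idx then strip_special_py rest pad_idx eos_idx
    else if t = eos_idx then []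
    else t :: strip_special_py rest pad_idx eos_idx

-- ===== PORT B =====
def strip_special_py_alt (seq : List Int) (pad_idx : Int) (eos_idx : Int) : List Int :=
  let toks := seq.filter (fun t => t ≠ pad_idx)
  -- end = toks.index(eos_idx) if eos_idx in toks else len(toks); .index guarded by membership
  let stop : Nat := if toks.contains eos_idx then (PySem.List.index? toks eos_idx).getD 0 else toks.length
  toks.take stop

-- ===== PRECONDITION & SPEC =====
def Spec_strip_special_py (seq : List Int) (pad_idx : Int) (eos_idx : Int) (out : List Int) : Prop := out = strip_special_py_alt seq pad_idx eos_idx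
instance (seq : List Int) (pad_idx : Int) (eos_idx : Int) (out : List Int) : Decidable (Spec_strip_special_py seq pad_idx eos_idx out) := by unfold Spec_strip_special_py; infer_instance

-- ===== CLAIM (what is proved, stated in full; the proofs are below) =====
def Claim_equal_strip_special_py : Prop := ∀ (seq : List Int) (pad_idx : Int) (eos_idx : Int), Dom_strip_special_py seq pad_idx eos_idx → Spec_strip_special_py seq pad_idx eos_idx (strip_special_py seq pad_idx eos_idx)

-- ===== LEMMAS AND PROOFS =====

-- A is takeWhile (≠ eos) of the pad-filtered list
theorem stripA_eq_takeWhile_filter (seq : List Int) (pad_idx eos_idx : Int) :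
    strip_special_py seq pad_idx eos_idx
      = (seq.filter (fun t => t ≠ pad_idx)).takeWhile (fun t => t ≠ eos_idx) := by
  induction seq with
  | nil => simp [strip_special_py]
  | cons t rest ih =>
    by_cases htp : t = pad_idx
    · simp [strip_special_py, htp, ih]
    · by_cases hte : t = eos_idx
      · subst hte
        simp [strip_special_py, htp]
      · simp [strip_special_py, htp, hte, ih]

-- truncating at the first eos (whole list if absent) is takeWhile (≠ eos)
theorem take_index_eq_takeWhile (toks : List Int) (eos_idx : Int) :
    toks.take (if toks.contains eos_idx then (PySem.List.index? toks eos_idx).getD 0 else toks.length)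
      = toks.takeWhile (fun t => t ≠ eos_idx) := by
  simp only [PySem.List.index?_eq_idxOf?]
  induction toks with
  | nil => simp
  | cons t rest ih =>
    by_cases hte : t = eos_idx
    · subst hte
      simp [List.idxOf?_cons, List.takeWhile]
    · by_cases hmem : eos_idx ∈ rest
      · rcases hk : List.idxOf? eos_idx rest with _ | k
        · exact absurd (List.idxOf?_eq_none_iff.mp hk) (by simpa using hmem)
        · rw [if_pos (by simpa using hmem)] at ih
          rw [hk, Option.getD_some] at ih
          have : List.idxOf? eos_idx (t :: rest) = some (k + 1) := by
            simp [List.idxOf?_cons, hte, hk]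
          rw [if_pos (by simp [hmem]), this, Option.getD_some]
          simp [List.takeWhile, hte, ih]
      · have hnc : ¬ (t :: rest).contains eos_idx = true := by
          simp only [List.contains_cons, Bool.or_eq_true, beq_iff_eq, not_or]
          exact ⟨fun h => hte h.symm, by simpa using hmem⟩
        rw [if_neg hnc, if_neg (by simpa using hmem)] at *
        rw [List.take_length] at ih
        simpa [List.takeWhile, hte] using ih

-- ===== VERDICT (by name: the statement is the Claim_ definition above) =====
theorem strip_special_py_spec : Claim_equal_strip_special_py := by
  intro seq pad_idx eos_idx _
  unfold Spec_strip_special_py strip_special_py_alt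
  rw [stripA_eq_takeWhile_filter, ← take_index_eq_takeWhile]
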